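-- pv_equiv track=rewrite | github.com/Priyansh121096/leetcode | 320.py | getAbbrForBitMask
-- ===== SOURCE A (Python) =====
-- def getAbbrForBitMask(word:str, bitmask: int) -> str:
--     bitmask = format(bitmask, f"0{len(word)}b")
--     out = []
--     currStreak = 0
--     for i in range(len(word)):
--         if bitmask[i] == "0":
--             currStreak += 1
--         else:
--             if currStreak:
--                 out.append(str(currStreak))
--                 currStreak = 0
--
--             out.append(word[i])
--
--     if currStreak:
--         out.append(str(currStreak))
--
--     return "".join(out)
-- ===== SOURCE B (Python) =====
-- def getAbbrForBitMask(word: str, bitmask: int) -> str: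
--     b = format(bitmask, f"0{len(word)}b")
--     n = len(word)
--     pieces = []
--     i = 0
--     while i < n:
--         j = i
--         while j < n and (b[j] == "0") == (b[i] == "0"):
--             j += 1
--         pieces.append(str(j - i) if b[i] == "0" else word[i:j])
--         i = j
--     return "".join(pieces)
-- ===== Notes on version B (the rewrite author's own statement) =====
-- stated objective: alternative
-- what changed: B replaces A's per-character streak accumulator (flush counter, append single chars) with a two-pointer run scanner over the padded binary string that emits one whole piece (run-length or word slice) per run of equal bits.
import Mathlib
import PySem

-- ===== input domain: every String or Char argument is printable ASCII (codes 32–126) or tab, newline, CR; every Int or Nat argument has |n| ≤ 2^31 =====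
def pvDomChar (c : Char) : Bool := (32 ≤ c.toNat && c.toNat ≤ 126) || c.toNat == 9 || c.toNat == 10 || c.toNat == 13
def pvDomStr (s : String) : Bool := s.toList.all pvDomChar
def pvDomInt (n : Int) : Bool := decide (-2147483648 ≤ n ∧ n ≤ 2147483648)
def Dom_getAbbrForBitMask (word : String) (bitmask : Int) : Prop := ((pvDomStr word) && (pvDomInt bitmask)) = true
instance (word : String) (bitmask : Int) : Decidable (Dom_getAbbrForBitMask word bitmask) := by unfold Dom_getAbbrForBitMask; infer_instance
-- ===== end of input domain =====

-- B replaces A's per-character streak accumulator with a two-pointer run scanner emitting one piece per run; same return value, alternative structure.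

-- shared helper: format(n, f"0{w}b") — zero-padded binary, '-' first then the pad zeros (exact hand port; PySem has toBin but not the width form)
def pvBinDigits : Nat → List Char
  | 0 => []
  | n + 1 => pvBinDigits ((n + 1) / 2) ++ [if (n + 1) % 2 = 1 then '1' else '0']
decreasing_by exact Nat.div_lt_self (Nat.succ_pos n) (by omega)

def pvBinRepr (n : Nat) : List Char := if n = 0 then ['0'] else pvBinDigits n

def pvFmtBin (n : Int) (w : Nat) : List Char :=
  if n < 0 then '-' :: (List.replicate (w - 1 - (pvBinRepr n.natAbs).length) '0' ++ pvBinRepr n.natAbs)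
  else List.replicate (w - (pvBinRepr n.natAbs).length) '0' ++ pvBinRepr n.natAbs

-- ===== PORT A =====
-- A's loop: out list of pieces, currStreak counter; flush the streak before a kept char and at the end
def pvLoopA : List (Char × Char) → List (List Char) → Nat → List (List Char)
  | [], out, k => if k ≠ 0 then out ++ [PySem.Int.toChars (k : Int)] else out
  | (c, w) :: rest, out, k =>
    if c = '0' then pvLoopA rest out (k + 1)
    else pvLoopA rest ((if k ≠ 0 then out ++ [PySem.Int.toChars (k : Int)] else out) ++ [[w]]) 0

def getAbbrForBitMask (word : String) (bitmask : Int) : String :=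
  String.mk (pvLoopA (List.zip (pvFmtBin bitmask word.toList.length) word.toList) [] 0).flatten

-- ===== PORT B =====
-- B's scanner: the inner while (advance j over the run of equal bits) is the takeWhile; one piece per run
def pvLoopB : List Char → List Char → List (List Char)
  | [], _ => []
  | c :: cs, ws =>
    let k := (List.takeWhile (fun d => (d == '0') == (c == '0')) (c :: cs)).length
    (if c = '0' then PySem.Int.toChars (k : Int) else ws.take k) ::
      pvLoopB (List.drop k (c :: cs)) (ws.drop k)
termination_by bs _ => bs.length
decreasing_by simp

def getAbbrForBitMask_alt (word : String) (bitmask : Int) : String :=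
  String.mk (pvLoopB ((pvFmtBin bitmask word.toList.length).take word.toList.length) word.toList).flatten

-- ===== PRECONDITION & SPEC =====
def Spec_getAbbrForBitMask (word : String) (bitmask : Int) (out : String) : Prop := out = getAbbrForBitMask_alt word bitmask
instance (word : String) (bitmask : Int) (out : String) : Decidable (Spec_getAbbrForBitMask word bitmask out) := by unfold Spec_getAbbrForBitMask; infer_instance

-- ===== CLAIM (what is proved, stated in full; the proofs are below) =====
def Claim_equal_getAbbrForBitMask : Prop := ∀ (word : String) (bitmask : Int), Dom_getAbbrForBitMask word bitmask → Spec_getAbbrForBitMask word bitmask (getAbbrForBitMask word bitmask)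

-- ===== LEMMAS AND PROOFS =====

theorem pv_zip_take (bs ws : List Char) : List.zip bs ws = List.zip (bs.take ws.length) ws := by
  induction bs generalizing ws with
  | nil => simp
  | cons b bt ih =>
    cases ws with
    | nil => simp
    | cons w wt =>
      simp only [List.length_cons, List.take_succ_cons, List.zip_cons_cons]
      rw [ih wt]

theorem pv_accA (l : List (Char × Char)) (out : List (List Char)) (k : Nat) :
    pvLoopA l out k = out ++ pvLoopA l [] k := by
  induction l generalizing out k with
  | nil => simp only [pvLoopA]; split <;> simp
  | cons p t ih =>
    obtain ⟨c, w⟩ := p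
    simp only [pvLoopA]
    split_ifs with hc hk hk'
    · exact ih out (k + 1)
    · conv_lhs => rw [ih]
      conv_rhs => rw [ih]
      simp
    · conv_lhs => rw [ih]
      conv_rhs => rw [ih]
      simp

theorem pv_zerosA (zs : List Char) : ∀ (ws : List Char) (rest : List (Char × Char)),
    (∀ c ∈ zs, c = '0') → zs.length = ws.length → ∀ k,
    pvLoopA (List.zip zs ws ++ rest) [] k = pvLoopA rest [] (k + zs.length) := by
  induction zs with
  | nil => intro ws rest _ _ k; simp
  | cons z zt ih =>
    intro ws rest hz hl k
    cases ws with
    | nil => simp at hl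
    | cons w wt =>
      have hz0 : z = '0' := hz z (by simp)
      subst hz0
      have harith : k + (('0' : Char) :: zt).length = (k + 1) + zt.length := by
        simp only [List.length_cons]; omega
      rw [harith]
      simp only [List.zip_cons_cons, List.cons_append, pvLoopA]
      simp only [if_true]
      exact ih wt rest (fun c hc => hz c (by simp [hc])) (by simpa using hl) (k + 1)

theorem pv_flushA (l : List (Char × Char)) (k : Nat) (hk : k ≠ 0)
    (hhead : ∀ c w t, l = (c, w) :: t → c ≠ '0') :
    pvLoopA l [] k = PySem.Int.toChars (k : Int) :: pvLoopA l [] 0 := by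
  cases l with
  | nil => simp [pvLoopA, hk]
  | cons p t =>
    obtain ⟨c, w⟩ := p
    have hc : c ≠ '0' := hhead c w t rfl
    simp only [pvLoopA, if_neg hc, if_pos hk, if_neg (by simp : ¬ (0 : Nat) ≠ 0)]
    rw [pv_accA t _ 0, pv_accA t ([] ++ [[w]]) 0]
    simp

theorem pv_onesA (ns : List Char) : ∀ (ws : List Char) (rest : List (Char × Char)),
    (∀ c ∈ ns, c ≠ '0') → ns.length = ws.length →
    pvLoopA (List.zip ns ws ++ rest) [] 0 = ws.map (fun w => [w]) ++ pvLoopA rest [] 0 := by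
  induction ns with
  | nil =>
    intro ws rest _ hl
    have : ws = [] := List.eq_nil_of_length_eq_zero (by simpa using hl.symm)
    subst this; simp
  | cons c ct ih =>
    intro ws rest hn hl
    cases ws with
    | nil => simp at hl
    | cons w wt =>
      have hc : c ≠ '0' := hn c (by simp)
      simp only [List.zip_cons_cons, List.cons_append, pvLoopA, if_neg hc,
        if_neg (by simp : ¬ (0 : Nat) ≠ 0), List.nil_append]
      rw [pv_accA, ih wt rest (fun c hc => hn c (by simp [hc])) (by simpa using hl)]
      simp

theorem pv_flatten_singletons (l : List Char) :
    (l.map (fun w => [w])).flatten = l := by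
  induction l with
  | nil => rfl
  | cons x t ih => simp [ih]

theorem pv_main (n : Nat) : ∀ (bs ws : List Char), bs.length ≤ n → bs.length = ws.length →
    (pvLoopA (List.zip bs ws) [] 0).flatten = (pvLoopB bs ws).flatten := by
  induction n with
  | zero =>
    intro bs ws hn hl
    have hb : bs = [] := List.eq_nil_of_length_eq_zero (by omega)
    subst hb
    simp [pvLoopB, pvLoopA]
  | succ n ih =>
    intro bs ws hn hl
    cases hbs : bs with
    | nil => subst hbs; simp [pvLoopB, pvLoopA]
    | cons c cs =>
      subst hbs
      set p : Char → Bool := fun d => (d == '0') == (c == '0') with hp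
      set tw := List.takeWhile p (c :: cs) with htw
      set dw := List.dropWhile p (c :: cs) with hdw
      set k := tw.length with hk
      have hsplit : tw ++ dw = c :: cs := List.takeWhile_append_dropWhile
      have hlen_sum : tw.length + dw.length = (c :: cs).length := by
        rw [← List.length_append, hsplit]
      have hklen : k ≤ (c :: cs).length := by omega
      have hdrop : List.drop k (c :: cs) = dw := by
        conv_lhs => rw [← hsplit]
        rw [hk]; exact List.drop_left
      have hwslen : (ws.take k).length = k := by
        rw [List.length_take]; omega
      have hzip : List.zip (c :: cs) ws = List.zip tw (ws.take k) ++ List.zip dw (ws.drop k) := by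
        conv_lhs => rw [← hsplit, ← List.take_append_drop k ws]
        exact List.zip_append (by rw [hwslen])
      have hdwlen : dw.length = (ws.drop k).length := by
        rw [List.length_drop]; omega
      have hdwle : dw.length ≤ n := by
        have hk1 : 1 ≤ k := by
          rw [hk, htw, List.takeWhile_cons, if_pos (by simp [hp])]
          simp
        simp only [List.length_cons] at hlen_sum hn
        omega
      have hBstep : pvLoopB (c :: cs) ws =
          (if c = '0' then PySem.Int.toChars (k : Int) else ws.take k) ::
            pvLoopB dw (ws.drop k) := by
        rw [pvLoopB]
        rw [show (List.takeWhile (fun d => (d == '0') == (c == '0')) (c :: cs)).length = k from rfl]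
        rw [hdrop]
      have hdwhead : ∀ d, ∀ t, dw = d :: t → ¬ ((d == '0') = (c == '0')) := by
        intro d t hdt hdc
        have hdd : List.dropWhile p (c :: cs) = d :: t := by rw [← hdw]; exact hdt
        have hne : List.dropWhile p (c :: cs) ≠ [] := by rw [hdd]; simp
        have hnp := List.head_dropWhile_not p hne
        simp only [hdd, List.head_cons] at hnp
        simp [hp, hdc] at hnp
      by_cases hc0 : c = '0'
      · -- run of zeros
        have htw0 : ∀ d ∈ tw, d = '0' := by
          intro d hd
          have := List.mem_takeWhile_imp hd
          simp [hp, hc0] at this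
          exact this
        rw [hzip, pv_zerosA tw (ws.take k) _ htw0 hwslen.symm 0]
        have hflush : pvLoopA (List.zip dw (ws.drop k)) [] (0 + tw.length) =
            PySem.Int.toChars ((0 + tw.length : Nat) : Int) ::
              pvLoopA (List.zip dw (ws.drop k)) [] 0 := by
          apply pv_flushA
          · have hk1 : 1 ≤ k := by
              rw [hk, htw, List.takeWhile_cons, if_pos (by simp [hp])]
              simp
            omega
          · intro c' w' t' hzz
            cases hdwc : dw with
            | nil => rw [hdwc] at hzz; simp [List.zip] at hzz
            | cons d ds =>
              rw [hdwc] at hzz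
              cases hws' : ws.drop k with
              | nil => rw [hws'] at hzz; simp [List.zip] at hzz
              | cons e es =>
                rw [hws'] at hzz
                simp only [List.zip_cons_cons, List.cons.injEq, Prod.mk.injEq] at hzz
                obtain ⟨⟨hcd, _⟩, _⟩ := hzz
                subst hcd
                intro hd0
                exact hdwhead d ds hdwc (by simp [hd0, hc0])
        rw [hflush, hBstep, if_pos hc0]
        simp only [List.flatten_cons, Nat.zero_add, hk]
        rw [ih dw (ws.drop k) hdwle hdwlen]
      · -- run of kept characters
        have htw1 : ∀ d ∈ tw, d ≠ '0' := by
          intro d hd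
          have := List.mem_takeWhile_imp hd
          simp [hp] at this
          intro hd0
          rw [hd0] at this
          simp at this
          exact hc0 this
        rw [hzip, pv_onesA tw (ws.take k) _ htw1 hwslen.symm]
        rw [hBstep, if_neg hc0]
        simp only [List.flatten_append, List.flatten_cons, pv_flatten_singletons]
        rw [ih dw (ws.drop k) hdwle hdwlen]

theorem pv_len_fmt (m : Int) (w : Nat) : w ≤ (pvFmtBin m w).length := by
  unfold pvFmtBin
  split <;> simp [List.length_replicate] <;> omega

-- ===== VERDICT (by name: the statement is the Claim_ definition above) =====
theorem getAbbrForBitMask_spec : Claim_equal_getAbbrForBitMask := by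
  intro word bitmask _
  unfold Spec_getAbbrForBitMask getAbbrForBitMask getAbbrForBitMask_alt
  apply congrArg
  rw [pv_zip_take]
  apply pv_main ((pvFmtBin bitmask word.toList.length).take word.toList.length).length
  · exact le_refl _
  · rw [List.length_take]
    have := pv_len_fmt bitmask word.toList.length
    omega
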